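-- pv_equiv track=rewrite | github.com/taisazero/code-review-benchmark | offline/code_review_benchmark/step1_5_parse_reviews.py | resolve_sections
-- ===== SOURCE A (Python) =====
-- DEFAULT_SECTIONS = {
--     "inline": True,
--     "actionable_summary": True,
--     "outside_diff": True,
--     "nitpick": False,
--     "walkthrough": False,
--     "pre_merge_checks": False,
--     "finishing_touches": False,
--     "review_details": False,
--     "additional_comments": False,
--     "additional_context": False,
--     "unknown": False,
-- }
--
-- def resolve_sections(
--     include: list[str] | None,
--     exclude: list[str] | None,
--     only: list[str] | None,
-- ) -> dict[str, bool]: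
--     """Resolve section filter config from CLI flags."""
--     if only:
--         return {name: (name in only) for name in DEFAULT_SECTIONS}
--     config = dict(DEFAULT_SECTIONS)
--     if include:
--         for name in include:
--             if name in config:
--                 config[name] = True
--     if exclude:
--         for name in exclude:
--             if name in config:
--                 config[name] = False
--     return config
-- ===== SOURCE B (Python) =====
-- DEFAULT_SECTIONS = {
--     "inline": True,
--     "actionable_summary": True,
--     "outside_diff": True,
--     "nitpick": False,
--     "walkthrough": False,
--     "pre_merge_checks": False,
--     "finishing_touches": False,
--     "review_details": False,
--     "additional_comments": False,
--     "additional_context": False,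
--     "unknown": False,
-- }
--
-- def resolve_sections(include, exclude, only):
--     """Resolve section filter config from CLI flags."""
--     names = list(DEFAULT_SECTIONS)
--     if only:
--         enabled = set(names) & set(only)
--     else:
--         enabled = ((set(n for n, d in DEFAULT_SECTIONS.items() if d)
--                     | (set(include or []) & set(names)))
--                    - set(exclude or []))
--     return {name: name in enabled for name in names}
-- ===== Notes on version B (the rewrite author's own statement) =====
-- stated objective: alternative
-- what changed: B computes the set of enabled section names by set algebra ((defaults-on | include&names) - exclude, or names&only) and then renders the config in one shared comprehension over the key list, instead of A's copy-the-dict-and-mutate-it-with-two-loops approach.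
import Mathlib
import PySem

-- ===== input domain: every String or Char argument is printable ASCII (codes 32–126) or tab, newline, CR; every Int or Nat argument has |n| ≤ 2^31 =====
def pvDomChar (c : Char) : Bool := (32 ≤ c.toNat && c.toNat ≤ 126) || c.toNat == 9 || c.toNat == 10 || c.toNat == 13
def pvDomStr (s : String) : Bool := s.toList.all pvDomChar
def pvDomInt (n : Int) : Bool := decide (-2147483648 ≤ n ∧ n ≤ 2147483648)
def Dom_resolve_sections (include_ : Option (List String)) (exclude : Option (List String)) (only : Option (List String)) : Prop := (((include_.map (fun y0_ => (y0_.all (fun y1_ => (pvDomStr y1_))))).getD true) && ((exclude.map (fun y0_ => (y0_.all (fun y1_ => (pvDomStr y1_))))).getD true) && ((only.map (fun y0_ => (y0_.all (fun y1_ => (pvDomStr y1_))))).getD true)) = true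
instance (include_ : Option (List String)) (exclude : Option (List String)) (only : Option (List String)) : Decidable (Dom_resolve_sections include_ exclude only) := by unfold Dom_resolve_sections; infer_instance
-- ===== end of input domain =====

-- ===== PORT A =====
-- B computes the SET of enabled section names by set algebra (defaults-on ∪ include∩names − exclude)
-- and renders it once over the key list, instead of A's copy-then-mutate loops (simpler decomposition).
def pvDefaultSectionsA : PySem.Dict String Bool :=
  PySem.Dict.ofList
    [("inline", true), ("actionable_summary", true), ("outside_diff", true),
     ("nitpick", false), ("walkthrough", false), ("pre_merge_checks", false),
     ("finishing_touches", false), ("review_details", false),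
     ("additional_comments", false), ("additional_context", false), ("unknown", false)]

-- A's main path: config = dict(DEFAULT_SECTIONS); the include loop then the exclude loop
def resolveA_main (include_ : Option (List String)) (exclude : Option (List String)) : List (String × Bool) :=
  let config := pvDefaultSectionsA
  let config :=
    match include_ with
    | some inc =>
        if inc ≠ [] then
          inc.foldl (fun c name => if c.contains name then c.insert name true else c) config
        else config
    | none => config
  let config :=
    match exclude with
    | some exc =>
        if exc ≠ [] then
          exc.foldl (fun c name => if c.contains name then c.insert name false else c) config
        else config
    | none => config
  PySem.Dict.items config

def resolve_sections (include_ : Option (List String)) (exclude : Option (List String)) (only : Option (List String)) : List (String × Bool) :=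
  match only with
  | some o =>
      if o ≠ [] then
        (PySem.Dict.keys pvDefaultSectionsA).map (fun name => (name, o.contains name))
      else resolveA_main include_ exclude
  | none => resolveA_main include_ exclude

-- ===== PORT B =====
def pvSectionDefaults : List (String × Bool) :=
  [("inline", true), ("actionable_summary", true), ("outside_diff", true),
   ("nitpick", false), ("walkthrough", false), ("pre_merge_checks", false),
   ("finishing_touches", false), ("review_details", false),
   ("additional_comments", false), ("additional_context", false), ("unknown", false)]

-- names = list(DEFAULT_SECTIONS)
def pvNames : List String := pvSectionDefaults.map Prod.fst

-- B's main path: enabled = (defaults-on ∪ (include ∩ names)) − exclude, as Python set algebra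
def enabledMain (inc exc : List String) : PySem.Set String :=
  PySem.Set.diff
    (PySem.Set.union
      (PySem.Set.ofList (pvSectionDefaults.filterMap (fun p => if p.2 then some p.1 else none)))
      (PySem.Set.inter (PySem.Set.ofList inc) (PySem.Set.ofList pvNames)))
    (PySem.Set.ofList exc)

def resolve_sections_alt (include_ : Option (List String)) (exclude : Option (List String)) (only : Option (List String)) : List (String × Bool) :=
  let enabled : PySem.Set String :=
    match only with
    | some o =>
        if o ≠ [] then PySem.Set.inter (PySem.Set.ofList pvNames) (PySem.Set.ofList o)
        else enabledMain (include_.getD []) (exclude.getD [])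
    | none => enabledMain (include_.getD []) (exclude.getD [])
  pvNames.map (fun name => (name, enabled.contains name))

-- ===== PRECONDITION & SPEC =====
def Spec_resolve_sections (include_ : Option (List String)) (exclude : Option (List String)) (only : Option (List String)) (out : List (String × Bool)) : Prop := out = resolve_sections_alt include_ exclude only
instance (include_ : Option (List String)) (exclude : Option (List String)) (only : Option (List String)) (out : List (String × Bool)) : Decidable (Spec_resolve_sections include_ exclude only out) := by unfold Spec_resolve_sections; infer_instance

-- ===== CLAIM (what is proved, stated in full; the proofs are below) =====
def Claim_equal_resolve_sections : Prop := ∀ (include_ : Option (List String)) (exclude : Option (List String)) (only : Option (List String)), Dom_resolve_sections include_ exclude only → Spec_resolve_sections include_ exclude only (resolve_sections include_ exclude only)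

-- ===== LEMMAS AND PROOFS =====

theorem items_default : pvDefaultSectionsA.items = pvSectionDefaults := by decide

-- A's guarded update loop is a pointwise overwrite of the values at the listed keys
theorem foldl_step (v : Bool) (l : List String) (d : PySem.Dict String Bool) :
    (l.foldl (fun c name => if c.contains name then c.insert name v else c) d).items
      = d.items.map (fun p => if l.contains p.1 then (p.1, v) else p) := by
  induction l generalizing d with
  | nil => simp
  | cons a l ih =>
      simp only [List.foldl_cons, ih]
      by_cases h : d.contains a
      · simp only [h, if_pos]
        simp only [PySem.Dict.insert, h, if_pos, List.map_map]
        apply List.map_congr_left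
        intro p _
        by_cases hp : p.1 == a
        · have : p.1 = a := by exact eq_of_beq hp
          simp [this]
        · have hne : p.1 ≠ a := by simpa using hp
          simp [hp, hne, Function.comp]
      · simp only [h, if_neg, Bool.false_eq_true, not_false_iff]
        have hall : ∀ p ∈ d.items, (p.1 == a) = false := by
          intro p hp
          by_contra hc
          exact h (List.any_eq_true.mpr ⟨p, hp, by simpa using hc⟩)
        apply List.map_congr_left
        intro p hp
        have hne : p.1 ≠ a := by simpa using hall p hp
        simp [hne]

theorem opt_loop (v : Bool) (o : Option (List String)) (d : PySem.Dict String Bool) :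
    (match o with
     | some l => if l ≠ [] then l.foldl (fun c name => if c.contains name then c.insert name v else c) d else d
     | none => d)
    = (o.getD []).foldl (fun c name => if c.contains name then c.insert name v else c) d := by
  cases o with
  | none => rfl
  | some l => cases l <;> simp

theorem mem_defaultsOn (p : String × Bool) (hp : p ∈ pvSectionDefaults) :
    p.1 ∈ pvSectionDefaults.filterMap (fun q => if q.2 then some q.1 else none) ↔ p.2 = true := by
  fin_cases hp <;> decide

theorem enabled_contains (inc exc : List String) (p : String × Bool) (hp : p ∈ pvSectionDefaults) :
    (enabledMain inc exc).contains p.1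
      = (!(exc.contains p.1) && (inc.contains p.1 || p.2)) := by
  have hn : p.1 ∈ pvNames := List.mem_map_of_mem hp
  have hmem : p.1 ∈ enabledMain inc exc ↔ (p.1 ∉ exc ∧ (p.1 ∈ inc ∨ p.2 = true)) := by
    unfold enabledMain
    simp [PySem.Set.mem_diff, PySem.Set.mem_union, PySem.Set.mem_inter, PySem.Set.mem_ofList,
      mem_defaultsOn p hp, hn]
    tauto
  rw [Bool.eq_iff_iff]
  simp [hmem]

theorem main_eq (include_ exclude : Option (List String)) :
    resolveA_main include_ exclude
      = pvNames.map (fun name => (name, (enabledMain (include_.getD []) (exclude.getD [])).contains name)) := by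
  unfold resolveA_main
  dsimp only
  rw [opt_loop, opt_loop, foldl_step, foldl_step, items_default]
  unfold pvNames
  simp only [List.map_map]
  apply List.map_congr_left
  intro p hp
  have hc := enabled_contains (include_.getD []) (exclude.getD []) p hp
  simp only [List.contains_eq_mem] at hc
  by_cases he : p.1 ∈ exclude.getD [] <;>
    by_cases hi : p.1 ∈ include_.getD [] <;>
      simp_all [Function.comp]

theorem only_eq (o : List String) :
    (PySem.Dict.keys pvDefaultSectionsA).map (fun name => (name, o.contains name))
      = pvNames.map (fun name => (name, (PySem.Set.inter (PySem.Set.ofList pvNames) (PySem.Set.ofList o)).contains name)) := by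
  have hk : PySem.Dict.keys pvDefaultSectionsA = pvNames := by decide
  rw [hk]
  apply List.map_congr_left
  intro n hn
  have : (PySem.Set.inter (PySem.Set.ofList pvNames) (PySem.Set.ofList o)).contains n = o.contains n := by
    rw [Bool.eq_iff_iff]
    simp [PySem.Set.mem_inter, PySem.Set.mem_ofList, hn]
  rw [this]

-- ===== VERDICT (by name: the statement is the Claim_ definition above) =====
theorem resolve_sections_spec : Claim_equal_resolve_sections := by
  intro include_ exclude only _
  unfold Spec_resolve_sections resolve_sections resolve_sections_alt
  cases only with
  | none => exact main_eq include_ exclude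
  | some o =>
      by_cases h : o = []
      · simp only [h, ne_eq, not_true_eq_false, if_neg, not_false_iff]
        exact main_eq include_ exclude
      · simp only [h, ne_eq, not_false_iff, if_pos]
        exact only_eq o
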